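-- pv_equiv track=rewrite | github.com/ViditDhull/CodingPractice | 20. Reverse the equation.py | reverseEqn
-- ===== SOURCE A (Python) =====
-- def reverseEqn(s):
--     each_ele = []
--     orig_arr = []
--     for i in s:
--         if i!='+' and i!='-' and i!='*' and i!='/':
--             each_ele.append(i)
--         else:
--             orig_arr.append(''.join(each_ele))
--             orig_arr.append(i)
--             each_ele = []
--     else:
--         orig_arr.append(''.join(each_ele))
--
--     rev_arr = [0] * (len(orig_arr))
--     for i in range(len(orig_arr)):
--         rev_arr[-i-1] = orig_arr[i]
--
--     return ''.join(rev_arr)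
-- ===== SOURCE B (Python) =====
-- def reverseEqn(s):
--     parts = []
--     buf = []
--     for c in reversed(s):
--         if c in '+-*/':
--             parts.append(''.join(reversed(buf)))
--             parts.append(c)
--             buf = []
--         else:
--             buf.append(c)
--     parts.append(''.join(reversed(buf)))
--     return ''.join(parts)
-- ===== Notes on version B (the rewrite author's own statement) =====
-- stated objective: alternative
-- what changed: B reverses the whole string once and, in a single pass over it, re-reverses each maximal operand run at the operator boundaries, instead of A's three-phase pipeline of tokenizing into a list, reversing it by an index-assignment loop over a preallocated array, and joining.
import Mathlib
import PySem

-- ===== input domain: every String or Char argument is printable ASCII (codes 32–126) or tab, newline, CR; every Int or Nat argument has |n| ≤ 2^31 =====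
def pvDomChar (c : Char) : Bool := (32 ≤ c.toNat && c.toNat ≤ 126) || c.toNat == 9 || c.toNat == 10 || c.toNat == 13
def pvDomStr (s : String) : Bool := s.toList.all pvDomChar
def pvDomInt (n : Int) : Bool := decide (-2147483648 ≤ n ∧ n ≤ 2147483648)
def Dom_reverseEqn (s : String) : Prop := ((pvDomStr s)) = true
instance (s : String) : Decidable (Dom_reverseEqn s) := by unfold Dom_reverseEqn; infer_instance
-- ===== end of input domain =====

-- B reverses the whole string once and repairs each operand run in a single pass, instead of
-- A's tokenize-into-a-list / index-reversal-loop / join pipeline (objective: simpler one-pass decomposition).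

-- ===== PORT A =====
-- tokens are kept as List Char (''.join(each_ele) on a list of 1-char strings is the char list itself)
def reverseEqn (s : String) : String :=
  let st := s.toList.foldl
    (fun (st : List Char × List (List Char)) i =>
      if i ≠ '+' ∧ i ≠ '-' ∧ i ≠ '*' ∧ i ≠ '/' then (st.1 ++ [i], st.2)
      else ([], st.2 ++ [st.1, [i]]))
    ([], [])
  let origArr := st.2 ++ [st.1]
  -- rev_arr = [0]*n: the int placeholder 0 is modelled by []; every cell is overwritten before use
  let revArr := (PySem.List.pyRange 0 (origArr.length) 1).foldl
    (fun (r : List (List Char)) i => PySem.List.pySetD r (-i-1) (PySem.List.pyGetD origArr i []))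
    (List.replicate origArr.length [])
  String.ofList (PySem.Chars.join [] revArr)

-- ===== PORT B =====
-- 'c in "+-*/"' on a single char is membership in the four operator chars (exact)
def reverseEqn_alt (s : String) : String :=
  let st := s.toList.reverse.foldl
    (fun (st : List Char × List (List Char)) c =>
      if c ∈ ['+', '-', '*', '/'] then ([], st.2 ++ [st.1.reverse, [c]])
      else (st.1 ++ [c], st.2))
    ([], [])
  String.ofList (PySem.Chars.join [] (st.2 ++ [st.1.reverse]))

-- ===== PRECONDITION & SPEC =====
def Spec_reverseEqn (s : String) (out : String) : Prop := out = reverseEqn_alt s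
instance (s : String) (out : String) : Decidable (Spec_reverseEqn s out) := by unfold Spec_reverseEqn; infer_instance

-- ===== CLAIM (what is proved, stated in full; the proofs are below) =====
def Claim_equal_reverseEqn : Prop := ∀ (s : String), Dom_reverseEqn s → Spec_reverseEqn s (reverseEqn s)

-- ===== LEMMAS AND PROOFS =====

-- the token list both programs implicitly build: operand runs (pre is the run in progress) and operators
def strTok (pre : List Char) : List Char → List (List Char)
  | [] => [pre]
  | c :: cs =>
    if c = '+' ∨ c = '-' ∨ c = '*' ∨ c = '/' then pre :: [c] :: strTok [] cs
    else strTok (pre ++ [c]) cs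

-- A's first loop produces exactly the token list
theorem A_fold_eq (l : List Char) : ∀ (each : List Char) (orig : List (List Char)),
    (let st := l.foldl
      (fun (st : List Char × List (List Char)) i =>
        if i ≠ '+' ∧ i ≠ '-' ∧ i ≠ '*' ∧ i ≠ '/' then (st.1 ++ [i], st.2)
        else ([], st.2 ++ [st.1, [i]]))
      (each, orig)
      ; st.2 ++ [st.1]) = orig ++ strTok each l := by
  induction l with
  | nil => intro each orig; simp [strTok]
  | cons c cs ih =>
    intro each orig
    by_cases h : c = '+' ∨ c = '-' ∨ c = '*' ∨ c = '/'
    · rw [List.foldl_cons, if_neg (by tauto)]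
      simpa [strTok, h] using ih [] (orig ++ [each, [c]])
    · rw [List.foldl_cons, if_pos (by tauto)]
      simpa [strTok, h] using ih (each ++ [c]) orig

-- B's single pass over the reversed chars produces the reversed token list
theorem B_fold_eq (l : List Char) : ∀ (pre : List Char),
    (let st := l.foldr
      (fun c (st : List Char × List (List Char)) =>
        if c ∈ ['+', '-', '*', '/'] then ([], st.2 ++ [st.1.reverse, [c]])
        else (st.1 ++ [c], st.2))
      ([], [])
      ; st.2 ++ [pre ++ st.1.reverse]) = (strTok pre l).reverse := by
  induction l with
  | nil => intro pre; simp [strTok]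
  | cons c cs ih =>
    intro pre
    by_cases h : c = '+' ∨ c = '-' ∨ c = '*' ∨ c = '/'
    · rw [List.foldr_cons, if_pos (by simpa using h)]
      have := ih []
      simp [strTok, h, ← this]
    · rw [List.foldr_cons, if_neg (by simpa using h)]
      have := ih (pre ++ [c])
      simp only [List.append_assoc, List.singleton_append] at this
      simpa [strTok, h] using this

-- negative-index assignment rev_arr[-k-1] = set at position n-1-k
theorem pySetD_neg_succ {α : Type} (xs : List α) (k : Nat) (v : α) (h : k < xs.length) :
    PySem.List.pySetD xs (-(k:Int)-1) v = xs.set (xs.length - 1 - k) v := by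
  have h1 : ¬ (1 : Int) ≤ -(k:Int) := by omega
  have h2 : ((1:Int) + k).toNat = k + 1 := by omega
  simp [PySem.List.pySetD, PySem.List.pySet?, PySem.List.pyIdx?, h1, h, h2]
  congr 1; omega

-- A's index-reversal loop: after k steps the last k cells hold the first k tokens in reverse
theorem revloop_eq {α : Type} (d : α) (orig : List α) :
    ∀ (k : Nat), k ≤ orig.length →
    (PySem.List.pyRange 0 (k:Int) 1).foldl
      (fun (r : List α) i => PySem.List.pySetD r (-i-1) (PySem.List.pyGetD orig i d))
      (List.replicate orig.length d)
    = List.replicate (orig.length - k) d ++ (orig.take k).reverse := by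
  intro k
  induction k with
  | zero => intro _; simp [PySem.List.pyRange_one_eq_nil]
  | succ k ih =>
    intro hk
    have hk' : k < orig.length := by omega
    have hrange : PySem.List.pyRange 0 ((k:Int)+1) 1 = PySem.List.pyRange 0 (k:Int) 1 ++ [(k:Int)] :=
      PySem.List.pyRange_one_succ_right (by omega)
    have hlen : (List.replicate (orig.length - k) d ++ (orig.take k).reverse).length = orig.length := by
      simp; omega
    rw [show ((k+1 : Nat) : Int) = (k:Int)+1 by push_cast; ring, hrange, List.foldl_append,
      ih (by omega)]
    simp only [List.foldl_cons, List.foldl_nil]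
    rw [pySetD_neg_succ _ k _ (by rw [hlen]; exact hk')]
    rw [hlen]
    have htake : orig.take (k+1) = orig.take k ++ [orig[k]] := by
      rw [← List.take_concat_get hk']; simp
    have hrep : List.replicate (orig.length - k) d =
        List.replicate (orig.length - (k+1)) d ++ [d] := by
      rw [← List.replicate_succ']; congr 1; omega
    rw [hrep, List.set_append]
    have hlt : ¬ orig.length - 1 - k < (List.replicate (orig.length - (k+1)) d).length := by
      simp; omega
    have hm : orig.length - 1 - k = orig.length - (k+1) := by omega
    rw [if_pos (by simp; omega), List.set_append, if_neg (by simp [hm])]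
    simp only [List.length_replicate, hm, Nat.sub_self, List.set_cons_zero]
    have hidx : PySem.List.pyGetD orig (↑k) d = orig[k] := by
      simp [PySem.List.pyGetD_natCast, List.getD_eq_getElem?_getD, hk']
    rw [htake, hidx, List.reverse_append]
    simp

-- ===== VERDICT (by name: the statement is the Claim_ definition above) =====
theorem reverseEqn_spec : Claim_equal_reverseEqn := by
  intro s _
  unfold Spec_reverseEqn reverseEqn reverseEqn_alt
  have hA := A_fold_eq s.toList [] []
  simp only [List.nil_append] at hA
  have hB := B_fold_eq s.toList []
  simp only [List.nil_append] at hB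
  rw [List.foldl_reverse]
  simp only [hA]
  have hrev := revloop_eq ([] : List Char) (strTok [] s.toList) (strTok [] s.toList).length le_rfl
  simp only [Nat.sub_self, List.replicate_zero, List.nil_append, List.take_length] at hrev
  rw [hrev]
  congr 1
  rw [← hB]
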